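-- pv_equiv track=rewrite | github.com/facundotorraca/modelos-y-programacion-I | washing_optimizer.py | next_coef_attire
-- ===== SOURCE A (Python) =====
-- WASHED = 2
--
-- COEFIC = 4
--
-- def next_coef_attire(attires):
--     curr_attire = None
--
--     #Find the first not washed attire
--     for attire in attires:
--         if not attire[WASHED]:
--             curr_attire = attire
--             break
--
--     for attire in attires:
--         if not attire[WASHED]:
--             if attire[COEFIC] >= curr_attire[COEFIC]:
--                 curr_attire = attire
--
--     return curr_attire;
-- ===== SOURCE B (Python) =====
-- WASHED = 2
--
-- COEFIC = 4
--
-- def next_coef_attire(attires):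
--     unwashed = [a for a in attires if not a[WASHED]]
--     if not unwashed:
--         return None
--     return sorted(unwashed, key=lambda a: a[COEFIC])[-1]
-- ===== Notes on version B (the rewrite author's own statement) =====
-- stated objective: alternative
-- what changed: A's two sequential scans with a running >= comparison are replaced by filter-then-stable-sort: B collects the unwashed attires, sorts them stably by coefficient and returns the last element, whose latest-among-ties position reproduces A's >= tie-break.
import Mathlib
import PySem

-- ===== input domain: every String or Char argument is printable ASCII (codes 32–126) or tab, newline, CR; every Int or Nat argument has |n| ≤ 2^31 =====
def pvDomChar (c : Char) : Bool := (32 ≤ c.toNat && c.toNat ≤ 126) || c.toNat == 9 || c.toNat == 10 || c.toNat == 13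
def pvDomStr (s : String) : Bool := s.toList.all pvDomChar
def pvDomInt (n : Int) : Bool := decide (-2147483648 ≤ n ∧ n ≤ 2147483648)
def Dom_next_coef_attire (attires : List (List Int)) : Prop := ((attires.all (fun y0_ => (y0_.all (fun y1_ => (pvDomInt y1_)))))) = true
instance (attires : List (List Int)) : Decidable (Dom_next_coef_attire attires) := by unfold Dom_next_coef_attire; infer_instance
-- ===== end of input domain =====

-- B replaces A's two scans with filter-then-stable-sort: collect the unwashed attires,
-- sort them stably by coefficient, return the last (latest among ties, like A's `>=`).

-- ===== PORT A =====
def next_coef_attire (attires : List (List Int)) : Option (List Int) :=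
  -- first loop with break: find the first not-washed attire
  let curr0 := attires.find? (fun a => PySem.List.pyGetD a 2 0 == 0)
  -- second loop over all attires
  attires.foldl (fun curr a =>
    if PySem.List.pyGetD a 2 0 == 0 then
      match curr with
      | some c => if PySem.List.pyGetD c 4 0 ≤ PySem.List.pyGetD a 4 0 then some a else some c
      | none => none   -- unreachable: the first loop found an unwashed attire if any exists
    else curr) curr0

-- ===== PORT B =====
def next_coef_attire_alt (attires : List (List Int)) : Option (List Int) :=
  let unwashed := attires.filter (fun a => PySem.List.pyGetD a 2 0 == 0)
  if unwashed.isEmpty then none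
  else PySem.List.pyGet? (PySem.List.sorted unwashed (fun a => PySem.List.pyGetD a 4 0)) (-1)

-- ===== PRECONDITION & SPEC =====
-- Pre_ excludes exactly the inputs on which the Python A raises IndexError: an attire
-- shorter than 3 (index WASHED=2 out of range), or an unwashed attire shorter than 5
-- (index COEFIC=4 out of range).
def Pre_next_coef_attire (attires : List (List Int)) : Prop :=
  ∀ a ∈ attires, 3 ≤ a.length ∧ (a.getD 2 0 = 0 → 5 ≤ a.length)
instance (attires : List (List Int)) : Decidable (Pre_next_coef_attire attires) := by
  unfold Pre_next_coef_attire; infer_instance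

def pvWitness_next_coef_attire : List (List Int) := [[1, 2, 0, 4, 7], [0, 0, 1], [5, 5, 0, 1, 7]]

def Spec_next_coef_attire (attires : List (List Int)) (out : Option (List Int)) : Prop := out = next_coef_attire_alt attires
instance (attires : List (List Int)) (out : Option (List Int)) : Decidable (Spec_next_coef_attire attires out) := by unfold Spec_next_coef_attire; infer_instance

-- ===== CLAIM (what is proved, stated in full; the proofs are below) =====
def Claim_equal_next_coef_attire : Prop := ∀ (attires : List (List Int)), Dom_next_coef_attire attires → Pre_next_coef_attire attires → Spec_next_coef_attire attires (next_coef_attire attires)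

-- ===== LEMMAS AND PROOFS =====

-- the unwashed test and the coefficient, as the ports compute them
def pvUnw (a : List Int) : Bool := PySem.List.pyGetD a 2 0 == 0
def pvCoef (a : List Int) : Int := PySem.List.pyGetD a 4 0

-- A's inner update once the accumulator is known to be a real attire
def pvStep2 (c a : List Int) : List Int := if pvCoef c ≤ pvCoef a then a else c

-- A's loop body
def pvStepA (curr : Option (List Int)) (a : List Int) : Option (List Int) :=
  if pvUnw a then
    match curr with
    | some c => if pvCoef c ≤ pvCoef a then some a else some c
    | none => none
  else curr

-- A's update, lifted to an Option accumulator (first element becomes the seed)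
def pvStepO (curr : Option (List Int)) (a : List Int) : Option (List Int) :=
  match curr with
  | none => some a
  | some c => some (pvStep2 c a)

-- insertion step of PySem.List.sorted with the coefficient key
def pvIns (x : List Int) (ys : List (List Int)) : List (List Int) :=
  PySem.List.insertBy (fun a b => decide (pvCoef a < pvCoef b)) x ys

theorem pvGetLast_cons (a : List Int) (l : List (List Int)) (h : l ≠ []) :
    (a :: l).getLast? = l.getLast? := by
  cases l with
  | nil => exact absurd rfl h
  | cons b t => simp [List.getLast?_cons_cons]

theorem pvFind_eq_head_filter (p : List Int → Bool) (l : List (List Int)) :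
    l.find? p = (l.filter p).head? := by
  induction l with
  | nil => rfl
  | cons h t ih =>
    by_cases hp : p h = true
    · rw [List.find?_cons_of_pos hp, List.filter_cons_of_pos hp]
      rfl
    · rw [List.find?_cons_of_neg hp, List.filter_cons_of_neg (by simp [hp]), ih]

theorem pvFoldA_none (l : List (List Int)) : l.foldl pvStepA none = none := by
  induction l with
  | nil => rfl
  | cons h t ih =>
    have : pvStepA none h = none := by
      unfold pvStepA; by_cases h2 : pvUnw h = true <;> simp [h2]
    simp [List.foldl, this, ih]

theorem pvFoldA_filter (l : List (List Int)) (c : Option (List Int)) :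
    l.foldl pvStepA c = (l.filter pvUnw).foldl pvStepA c := by
  induction l generalizing c with
  | nil => rfl
  | cons h t ih =>
    by_cases hu : pvUnw h = true
    · simp [List.foldl, List.filter, hu, ih]
    · have : pvStepA c h = c := by unfold pvStepA; simp [hu]
      simp [List.foldl, List.filter, hu, this, ih]

theorem pvFoldA_some (l : List (List Int)) (c : List Int) (hl : ∀ a ∈ l, pvUnw a = true) :
    l.foldl pvStepA (some c) = some (l.foldl pvStep2 c) := by
  induction l generalizing c with
  | nil => rfl
  | cons h t ih =>
    have hu : pvUnw h = true := hl h (by simp)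
    have ht : ∀ a ∈ t, pvUnw a = true := fun a ha => hl a (by simp [ha])
    by_cases hc : pvCoef c ≤ pvCoef h
    · simp [List.foldl, pvStepA, pvStep2, hu, hc, ih _ ht]
    · simp [List.foldl, pvStepA, pvStep2, hu, hc, ih _ ht]

-- every element of a ≤-sorted list has key at most the key of the last element
theorem pvKey_le_getLast (ys : List (List Int)) (m : List Int)
    (hp : ys.Pairwise (fun a b => pvCoef a ≤ pvCoef b)) (hm : ys.getLast? = some m) :
    ∀ y ∈ ys, pvCoef y ≤ pvCoef m := by
  induction ys with
  | nil => simp at hm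
  | cons h t ih =>
    intro y hy
    cases t with
    | nil =>
      simp at hm hy
      simp [hy, hm]
    | cons h2 t2 =>
      have hm' : (h2 :: t2).getLast? = some m := by
        have := hm
        rw [pvGetLast_cons _ _ (by simp)] at this
        exact this
      rcases List.mem_cons.mp hy with rfl | hyt
      · have hx : m ∈ h2 :: t2 := List.mem_of_getLast? hm'
        exact (List.pairwise_cons.mp hp).1 m hx
      · exact ih hp.tail hm' y hyt

-- insertBy never produces the empty list
theorem pvIns_ne_nil (x : List Int) (ys : List (List Int)) : pvIns x ys ≠ [] :=
  List.ne_nil_of_mem ((PySem.List.mem_insertBy _ _ _ _).mpr (Or.inl rfl))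

-- inserting an element with key below the last key keeps the last element
theorem pvIns_getLast_lt (x : List Int) (ys : List (List Int)) (m : List Int)
    (hm : ys.getLast? = some m) (hlt : pvCoef x < pvCoef m) :
    (pvIns x ys).getLast? = some m := by
  induction ys with
  | nil => simp at hm
  | cons h t ih =>
    cases t with
    | nil =>
      have : h = m := by simpa using hm
      subst this
      unfold pvIns PySem.List.insertBy
      simp [hlt]
    | cons h2 t2 =>
      have hm' : (h2 :: t2).getLast? = some m := by
        have := hm
        rw [pvGetLast_cons _ _ (by simp)] at this
        exact this
      unfold pvIns PySem.List.insertBy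
      by_cases hb : decide (pvCoef x < pvCoef h) = true
      · simp only [hb, if_true]
        rw [pvGetLast_cons _ _ (by simp)]
        exact hm
      · simp only [hb]
        show (h :: pvIns x (h2 :: t2)).getLast? = some m
        rw [pvGetLast_cons _ _ (pvIns_ne_nil x (h2 :: t2))]
        exact ih hm'

-- insertion preserves ≤-sortedness by the key
theorem pvIns_pairwise (x : List Int) (ys : List (List Int))
    (hp : ys.Pairwise (fun a b => pvCoef a ≤ pvCoef b)) :
    (pvIns x ys).Pairwise (fun a b => pvCoef a ≤ pvCoef b) := by
  induction ys with
  | nil => simp [pvIns, PySem.List.insertBy]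
  | cons h t ih =>
    unfold pvIns PySem.List.insertBy
    by_cases hb : pvCoef x < pvCoef h
    · simp only [decide_eq_true hb]
      refine List.pairwise_cons.mpr ⟨?_, hp⟩
      intro y hy
      rcases List.mem_cons.mp hy with rfl | hyt
      · exact le_of_lt hb
      · exact le_trans (le_of_lt hb) ((List.pairwise_cons.mp hp).1 y hyt)
    · rw [if_neg (by simpa using hb)]
      refine List.pairwise_cons.mpr ⟨?_, ih hp.tail⟩
      intro y hy
      rcases (PySem.List.mem_insertBy _ _ _ _).mp hy with rfl | hyt
      · omega
      · exact (List.pairwise_cons.mp hp).1 y hyt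

-- the last element of the insertion-sort accumulator tracks A's running maximum
theorem pvIns_getLast (x : List Int) (ys : List (List Int))
    (hp : ys.Pairwise (fun a b => pvCoef a ≤ pvCoef b)) :
    (pvIns x ys).getLast? = pvStepO ys.getLast? x := by
  rcases hm : ys.getLast? with _ | m
  · have : ys = [] := by
      cases ys with
      | nil => rfl
      | cons h t => rw [List.getLast?_cons] at hm; simp at hm
    subst this
    rfl
  · by_cases hc : pvCoef m ≤ pvCoef x
    · have hall : ∀ y ∈ ys, (fun a b => decide (pvCoef a < pvCoef b)) x y = false := by
        intro y hy
        have := pvKey_le_getLast ys m hp hm y hy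
        simp; omega
      unfold pvIns
      rw [PySem.List.insertBy_of_forall_not_before _ _ _ hall]
      simp [pvStepO, pvStep2, hm, hc]
    · have hlt : pvCoef x < pvCoef m := by omega
      rw [pvIns_getLast_lt x ys m hm hlt]
      simp [pvStepO, pvStep2, if_neg hc]

-- main invariant: the insertion-sort fold's last element is A's option-lifted scan
theorem pvSortScan (l : List (List Int)) (acc : List (List Int))
    (hp : acc.Pairwise (fun a b => pvCoef a ≤ pvCoef b)) :
    (l.foldl (fun ys x => pvIns x ys) acc).getLast? = l.foldl pvStepO acc.getLast? := by
  induction l generalizing acc with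
  | nil => rfl
  | cons h t ih =>
    simp only [List.foldl]
    rw [ih (pvIns h acc) (pvIns_pairwise h acc hp), pvIns_getLast h acc hp]

theorem pvFoldO_some (l : List (List Int)) (c : List Int) :
    l.foldl pvStepO (some c) = some (l.foldl pvStep2 c) := by
  induction l generalizing c with
  | nil => rfl
  | cons h t ih => simp [List.foldl, pvStepO, ih]

-- ===== VERDICT (by name: the statement is the Claim_ definition above) =====
theorem next_coef_attire_spec : Claim_equal_next_coef_attire := by
  intro attires _ _
  unfold Spec_next_coef_attire
  have hA : next_coef_attire attires = attires.foldl pvStepA (attires.find? pvUnw) := rfl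
  have hB : next_coef_attire_alt attires =
      (if (attires.filter pvUnw).isEmpty then none
       else PySem.List.pyGet? (PySem.List.sorted (attires.filter pvUnw) pvCoef) (-1)) := rfl
  rw [hA, hB]
  rcases hF : attires.filter pvUnw with _ | ⟨h, t⟩
  · have hfind : attires.find? pvUnw = none := by
      rw [pvFind_eq_head_filter, hF]; rfl
    rw [hfind, pvFoldA_none]
    rfl
  · -- A's side: fold over the unwashed attires starting from the first one
    have hfind : attires.find? pvUnw = some h := by
      rw [pvFind_eq_head_filter, hF]; rfl
    have hAside : attires.foldl pvStepA (attires.find? pvUnw) = some (t.foldl pvStep2 h) := by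
      rw [hfind, pvFoldA_filter, hF]
      have hmem : ∀ a ∈ h :: t, pvUnw a = true := by
        intro a ha
        have : a ∈ attires.filter pvUnw := by rw [hF]; exact ha
        exact (List.mem_filter.mp this).2
      rw [pvFoldA_some _ _ hmem]
      have hstep : pvStep2 h h = h := by unfold pvStep2; simp
      simp [List.foldl, hstep]
    rw [hAside]
    -- B's side: last of the stable sort
    rw [if_neg (by simp)]
    rw [PySem.List.pyGet?_neg_one, PySem.List.sorted_eq_foldl_insertBy]
    have hins : (List.foldl (fun acc x =>
        PySem.List.insertBy (fun a b => decide (pvCoef a < pvCoef b)) x acc) [] (h :: t))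
        = (h :: t).foldl (fun ys x => pvIns x ys) [] := rfl
    rw [hins, pvSortScan (h :: t) [] (by simp)]
    simp only [List.foldl]
    rw [show pvStepO ([] : List (List Int)).getLast? h = some h from rfl, pvFoldO_some]
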